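-- pv_equiv track=rewrite | github.com/jiuzhibuguniao/Test | previous/statistical rike data.py | statistic
-- ===== SOURCE A (Python) =====
-- def statistic(data):
--     dic={"0-0.5":0,'0.5-1':0,'1-2':0,'2-3':0,'3-4':0,"4-5":0,"5-inf":0}
--     for row in data:
--         if row<=500:
--             dic["0-0.5"]+=1
--         elif row<=1000:
--             dic["0.5-1"]+=1
--         elif row<=2000:
--             dic["1-2"]+=1
--         elif row<=3000:
--             dic["2-3"]+=1
--         elif row<=4000:
--             dic["3-4"]+=1
--         elif row<5000:
--             dic["4-5"]+=1
--         else: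
--             dic["5-inf"]+=1
--     return dic
-- ===== SOURCE B (Python) =====
-- def statistic(data):
--     keys = ("0-0.5", "0.5-1", "1-2", "2-3", "3-4", "4-5", "5-inf")
--     cum = [sum(1 for row in data if row <= t) for t in (500, 1000, 2000, 3000, 4000)]
--     cum += [sum(1 for row in data if row < 5000), len(data)]
--     counts = [cum[0]] + [hi - lo for lo, hi in zip(cum, cum[1:])]
--     return dict(zip(keys, counts))
-- ===== Notes on version B (the rewrite author's own statement) =====
-- stated objective: alternative
-- what changed: Replaces the per-element seven-way if/elif chain updating a dict with seven independent counting passes building cumulative '<= threshold' totals (plus '< 5000' and len), whose adjacent differences give the bucket counts, zipped with the keys at the end.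
import Mathlib
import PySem

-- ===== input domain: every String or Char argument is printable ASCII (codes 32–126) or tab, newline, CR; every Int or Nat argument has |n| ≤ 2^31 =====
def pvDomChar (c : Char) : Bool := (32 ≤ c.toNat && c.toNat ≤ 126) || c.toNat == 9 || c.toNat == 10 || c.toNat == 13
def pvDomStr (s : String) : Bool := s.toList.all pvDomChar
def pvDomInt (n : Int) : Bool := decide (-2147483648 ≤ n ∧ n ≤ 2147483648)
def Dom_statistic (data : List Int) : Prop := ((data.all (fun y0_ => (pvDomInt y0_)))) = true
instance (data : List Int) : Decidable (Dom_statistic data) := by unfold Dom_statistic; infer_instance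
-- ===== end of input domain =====

-- B replaces A's per-element seven-way if/elif chain over an incrementally updated dict with
-- seven independent counting passes (cumulative "<= threshold" totals, plus "< 5000" and len),
-- whose adjacent differences give the bucket counts (objective: alternative).

-- ===== PORT A =====
def statDic0 : PySem.Dict String Int :=
  PySem.Dict.ofList [("0-0.5", 0), ("0.5-1", 0), ("1-2", 0), ("2-3", 0), ("3-4", 0), ("4-5", 0), ("5-inf", 0)]

def statStep (d : PySem.Dict String Int) (row : Int) : PySem.Dict String Int :=
  if row ≤ 500 then d.modify "0-0.5" 0 (· + 1)
  else if row ≤ 1000 then d.modify "0.5-1" 0 (· + 1)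
  else if row ≤ 2000 then d.modify "1-2" 0 (· + 1)
  else if row ≤ 3000 then d.modify "2-3" 0 (· + 1)
  else if row ≤ 4000 then d.modify "3-4" 0 (· + 1)
  else if row < 5000 then d.modify "4-5" 0 (· + 1)
  else d.modify "5-inf" 0 (· + 1)

def statistic (data : List Int) : List (String × Int) :=
  (data.foldl statStep statDic0).items

-- ===== PORT B =====
def statKeys : List String := ["0-0.5", "0.5-1", "1-2", "2-3", "3-4", "4-5", "5-inf"]

-- sum(1 for row in data if row <= t)
def cntLe (data : List Int) (t : Int) : Int :=
  data.foldl (fun a r => if r ≤ t then a + 1 else a) 0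

-- sum(1 for row in data if row < 5000)
def cntLt5000 (data : List Int) : Int :=
  data.foldl (fun a r => if r < 5000 then a + 1 else a) 0

def statistic_alt (data : List Int) : List (String × Int) :=
  let cum : List Int :=
    ([500, 1000, 2000, 3000, 4000] : List Int).map (cntLe data)
      ++ [cntLt5000 data, (data.length : Int)]
  let counts : List Int :=
    cum.getD 0 0 :: (List.zip cum (cum.drop 1)).map (fun p => p.2 - p.1)
  List.zip statKeys counts

-- ===== PRECONDITION & SPEC =====
def Spec_statistic (data : List Int) (out : List (String × Int)) : Prop := out = statistic_alt data
instance (data : List Int) (out : List (String × Int)) : Decidable (Spec_statistic data out) := by unfold Spec_statistic; infer_instance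

-- ===== CLAIM (what is proved, stated in full; the proofs are below) =====
def Claim_equal_statistic : Prop := ∀ (data : List Int), Dom_statistic data → Spec_statistic data (statistic data)

-- ===== LEMMAS AND PROOFS =====

-- the dict A's loop maintains, as a function of the seven counts
def mkStatD (c0 c1 c2 c3 c4 c5 c6 : Int) : PySem.Dict String Int :=
  PySem.Dict.mk [("0-0.5", c0), ("0.5-1", c1), ("1-2", c2), ("2-3", c3), ("3-4", c4), ("4-5", c5), ("5-inf", c6)]

theorem cntLe_shift (t : Int) : ∀ (data : List Int) (c : Int),
    data.foldl (fun a r => if r ≤ t then a + 1 else a) c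
      = c + data.foldl (fun a r => if r ≤ t then a + 1 else a) 0 := by
  intro data
  induction data with
  | nil => intro c; simp
  | cons r rest ih =>
    intro c
    rw [List.foldl_cons, List.foldl_cons, ih, ih (if r ≤ t then 0 + 1 else 0)]
    split_ifs <;> omega

theorem cntLt5000_shift : ∀ (data : List Int) (c : Int),
    data.foldl (fun a r => if r < 5000 then a + 1 else a) c
      = c + data.foldl (fun a r => if r < 5000 then a + 1 else a) 0 := by
  intro data
  induction data with
  | nil => intro c; simp
  | cons r rest ih =>
    intro c
    rw [List.foldl_cons, List.foldl_cons, ih, ih (if r < 5000 then 0 + 1 else 0)]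
    split_ifs <;> omega

theorem cntLe_cons (t r : Int) (rest : List Int) :
    cntLe (r :: rest) t = (if r ≤ t then 1 else 0) + cntLe rest t := by
  unfold cntLe
  rw [List.foldl_cons, cntLe_shift]
  split_ifs <;> omega

theorem cntLt5000_cons (r : Int) (rest : List Int) :
    cntLt5000 (r :: rest) = (if r < 5000 then 1 else 0) + cntLt5000 rest := by
  unfold cntLt5000
  rw [List.foldl_cons, cntLt5000_shift]
  split_ifs <;> omega

-- main invariant: A's dict loop from a general accumulator, expressed via B's counts
theorem stat_loop : ∀ (data : List Int) (c0 c1 c2 c3 c4 c5 c6 : Int),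
    (data.foldl statStep (mkStatD c0 c1 c2 c3 c4 c5 c6)).items
      = List.zip statKeys
          [c0 + cntLe data 500,
           c1 + (cntLe data 1000 - cntLe data 500),
           c2 + (cntLe data 2000 - cntLe data 1000),
           c3 + (cntLe data 3000 - cntLe data 2000),
           c4 + (cntLe data 4000 - cntLe data 3000),
           c5 + (cntLt5000 data - cntLe data 4000),
           c6 + ((data.length : Int) - cntLt5000 data)] := by
  intro data
  induction data with
  | nil =>
    intro c0 c1 c2 c3 c4 c5 c6
    simp [mkStatD, statKeys, cntLe, cntLt5000]
  | cons row rest ih =>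
    intro c0 c1 c2 c3 c4 c5 c6
    rw [List.foldl_cons]
    simp only [cntLe_cons, cntLt5000_cons, List.length_cons]
    by_cases h1 : row ≤ 500
    · have hA : statStep (mkStatD c0 c1 c2 c3 c4 c5 c6) row = mkStatD (c0+1) c1 c2 c3 c4 c5 c6 := by
        simp [mkStatD, statStep, h1, PySem.Dict.modify, PySem.Dict.getD, PySem.Dict.get?, PySem.Dict.insert, PySem.Dict.contains]
      have h2 : row ≤ 1000 := by omega
      have h3 : row ≤ 2000 := by omega
      have h4 : row ≤ 3000 := by omega
      have h5 : row ≤ 4000 := by omega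
      have h6 : row < 5000 := by omega
      rw [hA, ih]
      exact congrArg (List.zip statKeys) (by simp only [List.cons.injEq, and_true]; push_cast; split_ifs <;> omega)
    · by_cases h2 : row ≤ 1000
      · have hA : statStep (mkStatD c0 c1 c2 c3 c4 c5 c6) row = mkStatD c0 (c1+1) c2 c3 c4 c5 c6 := by
          simp [mkStatD, statStep, h1, h2, PySem.Dict.modify, PySem.Dict.getD, PySem.Dict.get?, PySem.Dict.insert, PySem.Dict.contains]
        have h3 : row ≤ 2000 := by omega
        have h4 : row ≤ 3000 := by omega
        have h5 : row ≤ 4000 := by omega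
        have h6 : row < 5000 := by omega
        rw [hA, ih]
        exact congrArg (List.zip statKeys) (by simp only [List.cons.injEq, and_true]; push_cast; split_ifs <;> omega)
      · by_cases h3 : row ≤ 2000
        · have hA : statStep (mkStatD c0 c1 c2 c3 c4 c5 c6) row = mkStatD c0 c1 (c2+1) c3 c4 c5 c6 := by
            simp [mkStatD, statStep, h1, h2, h3, PySem.Dict.modify, PySem.Dict.getD, PySem.Dict.get?, PySem.Dict.insert, PySem.Dict.contains]
          have h4 : row ≤ 3000 := by omega
          have h5 : row ≤ 4000 := by omega
          have h6 : row < 5000 := by omega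
          rw [hA, ih]
          exact congrArg (List.zip statKeys) (by simp only [List.cons.injEq, and_true]; push_cast; split_ifs <;> omega)
        · by_cases h4 : row ≤ 3000
          · have hA : statStep (mkStatD c0 c1 c2 c3 c4 c5 c6) row = mkStatD c0 c1 c2 (c3+1) c4 c5 c6 := by
              simp [mkStatD, statStep, h1, h2, h3, h4, PySem.Dict.modify, PySem.Dict.getD, PySem.Dict.get?, PySem.Dict.insert, PySem.Dict.contains]
            have h5 : row ≤ 4000 := by omega
            have h6 : row < 5000 := by omega
            rw [hA, ih]
            exact congrArg (List.zip statKeys) (by simp only [List.cons.injEq, and_true]; push_cast; split_ifs <;> omega)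
          · by_cases h5 : row ≤ 4000
            · have hA : statStep (mkStatD c0 c1 c2 c3 c4 c5 c6) row = mkStatD c0 c1 c2 c3 (c4+1) c5 c6 := by
                simp [mkStatD, statStep, h1, h2, h3, h4, h5, PySem.Dict.modify, PySem.Dict.getD, PySem.Dict.get?, PySem.Dict.insert, PySem.Dict.contains]
              have h6 : row < 5000 := by omega
              rw [hA, ih]
              exact congrArg (List.zip statKeys) (by simp only [List.cons.injEq, and_true]; push_cast; split_ifs <;> omega)
            · by_cases h6 : row < 5000
              · have hA : statStep (mkStatD c0 c1 c2 c3 c4 c5 c6) row = mkStatD c0 c1 c2 c3 c4 (c5+1) c6 := by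
                  simp [mkStatD, statStep, h1, h2, h3, h4, h5, h6, PySem.Dict.modify, PySem.Dict.getD, PySem.Dict.get?, PySem.Dict.insert, PySem.Dict.contains]
                rw [hA, ih]
                exact congrArg (List.zip statKeys) (by simp only [List.cons.injEq, and_true]; push_cast; split_ifs <;> omega)
              · have hA : statStep (mkStatD c0 c1 c2 c3 c4 c5 c6) row = mkStatD c0 c1 c2 c3 c4 c5 (c6+1) := by
                  simp [mkStatD, statStep, h1, h2, h3, h4, h5, h6, PySem.Dict.modify, PySem.Dict.getD, PySem.Dict.get?, PySem.Dict.insert, PySem.Dict.contains]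
                rw [hA, ih]
                exact congrArg (List.zip statKeys) (by simp only [List.cons.injEq, and_true]; push_cast; split_ifs <;> omega)

-- B's result written with the same seven count expressions
theorem alt_eq (data : List Int) :
    statistic_alt data
      = List.zip statKeys
          [cntLe data 500,
           cntLe data 1000 - cntLe data 500,
           cntLe data 2000 - cntLe data 1000,
           cntLe data 3000 - cntLe data 2000,
           cntLe data 4000 - cntLe data 3000,
           cntLt5000 data - cntLe data 4000,
           (data.length : Int) - cntLt5000 data] := by
  simp [statistic_alt, List.zip]

-- ===== VERDICT (by name: the statement is the Claim_ definition above) =====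
theorem statistic_spec : Claim_equal_statistic := by
  intro data _
  unfold Spec_statistic statistic
  have h0 : statDic0 = mkStatD 0 0 0 0 0 0 0 := rfl
  rw [h0, stat_loop data 0 0 0 0 0 0 0, alt_eq]
  simp
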